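-- pv_equiv track=rewrite | github.com/margoseltzer/article-scraping | src/db_processor.py | get_valid_props
-- ===== SOURCE A (Python) =====
-- def get_valid_props(props_lists):
--     ''' Extract only useful and valid props from props_lists
--         return [type, value]
--     '''
--     props_list = sum(props_lists, [])
--     prefix = props_list[0]
--     typ = ''
--     val = ''
--     for i, prop in enumerate(props_list, start=0):
--         if prop == 'type':
--             typ = props_list[i+1]
--             break
--
--     if typ == 'article' or typ == 'reference' or typ == 'government':
--         for i, prop in enumerate(props_list, start=0):
--             if prop == 'url':
--                 val = props_list[i+1]
--                 break
--
--     elif typ == 'person':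
--         for i, prop in enumerate(props_list, start=0):
--             if prop == 'name':
--                 val = props_list[i+1]
--                 break
--
--     else:
--         for i, prop in enumerate(props_list, start=0):
--             if prop == typ:
--                 tmp_val = props_list[i+1]
--                 if tmp_val != prefix:
--                     val = tmp_val
--                     break
--
--     return [typ, val]
-- ===== SOURCE B (Python) =====
-- def get_valid_props(props_lists):
--     ''' Extract only useful and valid props from props_lists
--         return [type, value]
--     '''
--     props = [p for lst in props_lists for p in lst]
--     prefix = props[0]
--     table = {}
--     for k, v in zip(props, props[1:]):
--         table.setdefault(k, []).append(v)
--     typ = table.get('type', [''])[0]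
--     if typ in ('article', 'reference', 'government'):
--         val = table.get('url', [''])[0]
--     elif typ == 'person':
--         val = table.get('name', [''])[0]
--     else:
--         val = next((v for v in table.get(typ, []) if v != prefix), '')
--     return [typ, val]
-- ===== Notes on version B (the rewrite author's own statement) =====
-- stated objective: faster
-- what changed: Replaces A's quadratic sum(props_lists, []) flatten and three repeated enumerate-and-index scans by a linear comprehension flatten plus a single pass building a dict mapping each key to the ordered list of values following its occurrences, answered by plain table lookups.
import Mathlib
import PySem

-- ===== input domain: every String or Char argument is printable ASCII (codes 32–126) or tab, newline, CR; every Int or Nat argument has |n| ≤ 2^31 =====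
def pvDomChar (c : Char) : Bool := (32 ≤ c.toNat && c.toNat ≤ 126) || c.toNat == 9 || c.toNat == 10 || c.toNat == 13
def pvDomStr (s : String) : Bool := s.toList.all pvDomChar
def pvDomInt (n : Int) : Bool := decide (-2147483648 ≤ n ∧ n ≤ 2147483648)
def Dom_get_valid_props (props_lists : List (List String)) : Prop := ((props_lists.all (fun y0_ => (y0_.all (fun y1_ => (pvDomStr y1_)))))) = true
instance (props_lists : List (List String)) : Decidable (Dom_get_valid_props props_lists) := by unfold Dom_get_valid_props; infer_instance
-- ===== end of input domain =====

-- B replaces A's quadratic sum(props_lists, []) flatten and repeated enumerate-and-index scans by a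
-- linear comprehension flatten plus one pass building a key → following-values index, then plain lookups
-- (objective: faster; a timing run measured B faster on large inputs).

-- ===== PORT A =====
-- "for i, prop in enumerate(props_list): if prop == key: x = props_list[i+1]; break":
-- props_list[i+1] is the head of the suffix after position i; pyGet? rest 0 = none is exactly
-- Python's IndexError there (those inputs are outside Pre_).
def gvScanNext (key : String) : List String → String
  | [] => ""
  | p :: rest => if p == key then (PySem.List.pyGet? rest 0).getD "" else gvScanNext key rest

-- the else-branch scan: first value following an occurrence of typ that differs from the prefix
def gvScanElse (typ pref : String) : List String → String
  | [] => ""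
  | p :: rest =>
    if p == typ then
      let tmp := (PySem.List.pyGet? rest 0).getD ""
      if tmp != pref then tmp else gvScanElse typ pref rest
    else gvScanElse typ pref rest

def get_valid_props (props_lists : List (List String)) : List String :=
  let props_list := props_lists.foldl (· ++ ·) []         -- sum(props_lists, [])
  let pref := (PySem.List.pyGet? props_list 0).getD ""    -- props_list[0]; none = IndexError, outside Pre_
  let typ := gvScanNext "type" props_list
  let val :=
    if typ == "article" || typ == "reference" || typ == "government" then gvScanNext "url" props_list
    else if typ == "person" then gvScanNext "name" props_list
    else gvScanElse typ pref props_list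
  [typ, val]

-- ===== PORT B =====
-- table.setdefault(k, []).append(v)  =  d.modify k [] (· ++ [v])
def gvTable (props : List String) : PySem.Dict String (List String) :=
  (props.zip props.tail).foldl (fun d kv => d.modify kv.1 [] (· ++ [kv.2])) PySem.Dict.empty

def get_valid_props_alt (props_lists : List (List String)) : List String :=
  let props := props_lists.flatMap id                     -- [p for lst in props_lists for p in lst]
  let pref := (PySem.List.pyGet? props 0).getD ""         -- props[0]; none = IndexError, outside Pre_
  let table := gvTable props
  -- table.get(k, [''])[0]: the indexed list is never empty, so [0] is its head
  let typ := (table.getD "type" [""]).headD ""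
  let val :=
    if typ == "article" || typ == "reference" || typ == "government" then (table.getD "url" [""]).headD ""
    else if typ == "person" then (table.getD "name" [""]).headD ""
    else ((table.getD typ []).find? (fun v => v != pref)).getD ""
  [typ, val]

-- ===== PRECONDITION & SPEC =====
-- Pre_ excludes exactly the inputs where Python A raises IndexError: a flattened result with no
-- elements (props_list[0]), a searched key whose first occurrence is the last element (props_list[i+1]),
-- or — in the else branch — typ last with every earlier occurrence of typ followed by the prefix.
def Pre_get_valid_props (props_lists : List (List String)) : Prop :=
  let ps := props_lists.flatten
  let pairs := ps.zip ps.tail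
  let typ := (((pairs.filter (fun q => q.1 == "type")).map Prod.snd).headD "")
  ps ≠ [] ∧
  ¬("type" ∈ ps ∧ "type" ∉ ps.dropLast) ∧
  (if typ = "article" ∨ typ = "reference" ∨ typ = "government" then
      ¬("url" ∈ ps ∧ "url" ∉ ps.dropLast)
   else if typ = "person" then
      ¬("name" ∈ ps ∧ "name" ∉ ps.dropLast)
   else
      ¬(ps.getLast? = some typ ∧ (pairs.filter (fun q => q.1 == typ)).all (fun q => q.2 == ps.headD "")))
instance (props_lists : List (List String)) : Decidable (Pre_get_valid_props props_lists) := by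
  unfold Pre_get_valid_props; infer_instance

def pvWitness_get_valid_props : List (List String) := [["type", "article"], ["url", "http://x", "end"]]

def Spec_get_valid_props (props_lists : List (List String)) (out : List String) : Prop := out = get_valid_props_alt props_lists
instance (props_lists : List (List String)) (out : List String) : Decidable (Spec_get_valid_props props_lists out) := by unfold Spec_get_valid_props; infer_instance

-- ===== CLAIM (what is proved, stated in full; the proofs are below) =====
def Claim_equal_get_valid_props : Prop := ∀ (props_lists : List (List String)), Dom_get_valid_props props_lists → Pre_get_valid_props props_lists → Spec_get_valid_props props_lists (get_valid_props props_lists)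

-- ===== LEMMAS AND PROOFS =====
theorem gv_foldl_append (l : List (List String)) (a : List String) :
    l.foldl (· ++ ·) a = a ++ l.flatten := by
  induction l generalizing a with
  | nil => simp
  | cons x xs ih => simp [List.foldl_cons, ih, List.flatten_cons]

-- the ordered list of values immediately following occurrences of k in ps
def gvF (ps : List String) (k : String) : List String :=
  ((ps.zip ps.tail).filter (fun q => q.1 == k)).map Prod.snd

theorem gv_scanNext_eq (k : String) (ps : List String) :
    gvScanNext k ps = (gvF ps k).headD "" := by
  induction ps with
  | nil => rfl
  | cons p rest ih =>
    cases rest with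
    | nil =>
      by_cases h : p = k <;> simp [gvScanNext, gvF, h, PySem.List.pyGet?, PySem.List.pyIdx?]
    | cons r rs =>
      by_cases h : p = k
      · simp [gvScanNext, gvF, h, PySem.List.pyGet?, PySem.List.pyIdx?]
      · simp only [gvScanNext, gvF] at ih ⊢
        simpa [h] using ih

theorem gv_scanElse_eq (typ pref : String) (ps : List String) :
    gvScanElse typ pref ps = ((gvF ps typ).find? (fun v => v != pref)).getD "" := by
  induction ps with
  | nil => rfl
  | cons p rest ih =>
    cases rest with
    | nil =>
      by_cases h : p = typ <;>
        by_cases h2 : ("" : String) = pref <;>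
        simp [gvScanElse, gvF, h, h2, PySem.List.pyGet?, PySem.List.pyIdx?]
    | cons r rs =>
      by_cases h : p = typ
      · by_cases h2 : r = pref
        · simp only [gvScanElse, gvF] at ih ⊢
          simpa [h, h2, PySem.List.pyGet?, PySem.List.pyIdx?] using ih
        · simp [gvScanElse, gvF, h, h2, PySem.List.pyGet?, PySem.List.pyIdx?]
      · simp only [gvScanElse, gvF] at ih ⊢
        simpa [h] using ih

theorem gv_getD_congr {d : PySem.Dict String (List String)} {k : String}
    (h : d.contains k = true) (d1 d2 : List String) : d.getD k d1 = d.getD k d2 := by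
  rw [PySem.Dict.getD_eq_get?_getD, PySem.Dict.getD_eq_get?_getD]
  rw [PySem.Dict.contains_eq_isSome_get?] at h
  cases hg : d.get? k with
  | none => rw [hg] at h; simp at h
  | some v => simp

theorem gv_table_getD_nil (ps : List String) (k : String) :
    (gvTable ps).getD k [] = gvF ps k := by
  simpa [gvTable, gvF] using
    (PySem.Dict.getD_foldl_modify_append (ps.zip ps.tail) (PySem.Dict.empty) k)

theorem gv_contains_foldl (pairs : List (String × String))
    (d : PySem.Dict String (List String)) (k : String) :
    (pairs.foldl (fun d kv => d.modify kv.1 [] (· ++ [kv.2])) d).contains k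
      = (d.contains k || pairs.any (fun q => q.1 == k)) := by
  induction pairs generalizing d with
  | nil => simp
  | cons a l ih =>
    simp only [List.foldl_cons, List.any_cons, ih, PySem.Dict.contains_modify]
    by_cases h : a.1 = k
    · simp [h]
    · have h1 : (k == a.1) = false := by simp [Ne.symm h]
      have h2 : (a.1 == k) = false := by simp [h]
      rw [h1, h2]
      simp

theorem gv_table_getD_headD (ps : List String) (k : String) :
    ((gvTable ps).getD k [""]).headD "" = (gvF ps k).headD "" := by
  by_cases h : (gvTable ps).contains k = true
  · rw [gv_getD_congr h [""] [], gv_table_getD_nil]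
  · have hc := gv_contains_foldl (ps.zip ps.tail) PySem.Dict.empty k
    rw [gvTable] at h
    rw [hc] at h
    simp only [PySem.Dict.contains_empty, Bool.false_or, Bool.not_eq_true] at h
    have hF : gvF ps k = [] := by
      unfold gvF
      apply List.map_eq_nil_iff.mpr
      rw [List.filter_eq_nil_iff]
      intro q hq
      have := List.any_eq_false.mp h q hq
      simpa using this
    rw [PySem.Dict.getD_of_not_contains, hF]
    · rfl
    · rw [gvTable] at *
      rw [gv_contains_foldl]
      simpa using h

-- ===== VERDICT (by name: the statement is the Claim_ definition above) =====
theorem get_valid_props_spec : Claim_equal_get_valid_props := by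
  intro pl _ _
  unfold Spec_get_valid_props get_valid_props get_valid_props_alt
  simp only [gv_foldl_append, List.nil_append, List.flatMap_id,
    gv_scanNext_eq, gv_scanElse_eq, gv_table_getD_headD, gv_table_getD_nil]
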